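-- pv_equiv track=rewrite | github.com/HeyJunie/GroupStudy | 06_14/08.py | solution
-- ===== SOURCE A (Python) =====
-- from collections import deque
-- from collections import defaultdict
--
-- def solution(subway, s, e):
--     graph = defaultdict(set)
--     for i in range(len(subway)):
--         for stop in subway[i]:
--             graph[stop].add(i)
--     ch = [0] * len(subway)
--     deq = deque()
--     deq.append(s)
--     L = 0
--     while deq:
--         length = len(deq)
--         # 레벨 탐색
--         for i in range(length):
--             curstop = deq.popleft()
--             for line in graph[curstop]:
--                 if ch[line] == 1:
--                     continue
--                 else:
--                     ch[line] = 1
--                     for stop in subway[line]: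
--                         if stop == e:
--                             return L
--                         deq.append(stop)
--         L += 1
--     return -1  # queue가 끝났을 때도 도착역에 도착할 수 없으면, -1 반환
-- ===== SOURCE B (Python) =====
-- def solution(subway, s, e):
--     # Level-synchronous frontier of LINES (no queue, no stop->lines dict):
--     # each round, the next frontier is every unvisited line sharing a stop
--     # with the current frontier's stop set.
--     visited = [s in line for line in subway]
--     frontier = [i for i in range(len(subway)) if s in subway[i]]
--     L = 0
--     while frontier:
--         if any(e in subway[i] for i in frontier):
--             return L
--         stops = {stop for i in frontier for stop in subway[i]}
--         nxt = [j for j in range(len(subway))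
--                if not visited[j] and any(stop in stops for stop in subway[j])]
--         for j in nxt:
--             visited[j] = True
--         frontier = nxt
--         L += 1
--     return -1
-- ===== Notes on version B (the rewrite author's own statement) =====
-- stated objective: alternative
-- what changed: Replaces A's stop-level deque BFS (stop->lines defaultdict index, every stop of every newly marked line enqueued and re-looked-up, with duplicates) by a level-synchronous frontier of LINES: each round checks the frontier lines for e, collects their stop set, and rescans the line list once for unvisited lines meeting that set; no queue and no dict.
import Mathlib
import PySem

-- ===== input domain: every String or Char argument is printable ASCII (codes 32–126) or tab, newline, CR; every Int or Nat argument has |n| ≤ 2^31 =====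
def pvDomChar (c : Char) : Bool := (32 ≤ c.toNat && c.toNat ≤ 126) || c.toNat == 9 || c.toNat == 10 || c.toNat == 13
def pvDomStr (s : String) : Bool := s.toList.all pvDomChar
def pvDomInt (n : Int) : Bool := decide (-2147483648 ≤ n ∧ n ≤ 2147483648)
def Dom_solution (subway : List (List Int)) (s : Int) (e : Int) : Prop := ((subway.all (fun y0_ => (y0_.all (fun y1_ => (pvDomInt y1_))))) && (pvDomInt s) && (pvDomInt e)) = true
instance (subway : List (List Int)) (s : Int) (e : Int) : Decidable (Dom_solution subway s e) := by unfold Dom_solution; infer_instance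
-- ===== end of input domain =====

-- B replaces A's stop-level deque BFS (with its stop→lines defaultdict) by a level-synchronous
-- frontier of LINES with no queue and no dict; same return value, no speed claim (objective: alternative).

-- ===== PORT A =====
-- graph = defaultdict(set); for i in range(len(subway)): for stop in subway[i]: graph[stop].add(i)
-- (the defaultdict in-place mutation is ported as re-inserting the grown set; only getD-lookups observe it)
def aGraph (subway : List (List Int)) : PySem.Dict Int (PySem.Set Int) :=
  (PySem.List.pyRange 0 (subway.length : Int) 1).foldl
    (fun g i =>
      ((PySem.List.pyGet? subway i).getD []).foldl
        (fun g stop => g.insert stop ((g.getD stop PySem.Set.empty).add i)) g)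
    PySem.Dict.empty

-- for stop in subway[line]: if stop == e: return L ; deq.append(stop)
def aScan (e : Int) (L : Int) (stops : List Int) (q : List Int) : Option Int × List Int :=
  stops.foldl
    (fun st stop =>
      match st with
      | (some v, q) => (some v, q)
      | (none, q) => if stop == e then (some L, q) else (none, q ++ [stop]))
    (none, q)

-- body of "for line in graph[curstop]"; ch[line] is read/written at line ∈ range(len(subway)),
-- so ch.set line.toNat 1 is exact for Python's in-range ch[line] = 1
def aLine (subway : List (List Int)) (e : Int) (L : Int)
    (st : Option Int × List Int × List Int) (line : Int) : Option Int × List Int × List Int :=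
  match st with
  | (some v, ch, q) => (some v, ch, q)
  | (none, ch, q) =>
    if (PySem.List.pyGet? ch line).getD 0 == 1 then (none, ch, q)
    else
      let ch' := ch.set line.toNat 1
      let r := aScan e L ((PySem.List.pyGet? subway line).getD []) q
      (r.1, ch', r.2)

-- one popped stop: for line in graph[curstop]: …
def aStop (subway : List (List Int)) (g : PySem.Dict Int (PySem.Set Int)) (e : Int) (L : Int)
    (st : Option Int × List Int × List Int) (curstop : Int) : Option Int × List Int × List Int :=
  (g.getD curstop PySem.Set.empty).foldl (aLine subway e L) st

-- one while-iteration: length = len(deq) is taken first, so exactly the current queue is popped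
-- and the appended stops form the next queue
def aLevel (subway : List (List Int)) (g : PySem.Dict Int (PySem.Set Int)) (e : Int) (L : Int)
    (queue : List Int) (ch : List Int) : Option Int × List Int × List Int :=
  queue.foldl (aStop subway g e L) (none, ch, [])

-- while deq: … ; fuel = len(subway)+2 bounds the number of while-iterations (proved unnecessary to reach 0)
def aLoop (subway : List (List Int)) (g : PySem.Dict Int (PySem.Set Int)) (e : Int) :
    Nat → List Int → List Int → Int → Int
  | 0, _, _, _ => -1
  | fuel+1, queue, ch, L =>
    if queue.isEmpty then -1
    else
      match aLevel subway g e L queue ch with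
      | (some v, _, _) => v
      | (none, ch', q') => aLoop subway g e fuel q' ch' (L + 1)

def solution (subway : List (List Int)) (s : Int) (e : Int) : Int :=
  aLoop subway (aGraph subway) e (subway.length + 2) [s] (List.replicate subway.length 0) 0

-- ===== PORT B =====
-- stops = {stop for i in frontier for stop in subway[i]}
def bStops (subway : List (List Int)) (frontier : List Int) : PySem.Set Int :=
  frontier.foldl
    (fun st i => ((PySem.List.pyGet? subway i).getD []).foldl (fun st stop => st.add stop) st)
    PySem.Set.empty

-- while frontier: … ; fuel = len(subway)+1 bounds the number of while-iterations
-- (visited[j] is read/written at j ∈ range(len(subway)), so pyGet?/set j.toNat are exact)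
def bLoop (subway : List (List Int)) (e : Int) :
    Nat → List Bool → List Int → Int → Int
  | 0, _, _, _ => -1
  | fuel+1, visited, frontier, L =>
    if frontier.isEmpty then -1
    else if frontier.any (fun i => decide (e ∈ (PySem.List.pyGet? subway i).getD [])) then L
    else
      let stops := bStops subway frontier
      let nxt := (PySem.List.pyRange 0 (subway.length : Int) 1).filter
        (fun j => !((PySem.List.pyGet? visited j).getD false) &&
                  ((PySem.List.pyGet? subway j).getD []).any (fun stop => stops.contains stop))
      let visited' := nxt.foldl (fun v j => v.set j.toNat true) visited
      bLoop subway e fuel visited' nxt (L + 1)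

def solution_alt (subway : List (List Int)) (s : Int) (e : Int) : Int :=
  let visited := subway.map (fun line => decide (s ∈ line))
  let frontier := (PySem.List.pyRange 0 (subway.length : Int) 1).filter
    (fun i => decide (s ∈ (PySem.List.pyGet? subway i).getD []))
  bLoop subway e (subway.length + 1) visited frontier 0

-- ===== PRECONDITION & SPEC =====
def Spec_solution (subway : List (List Int)) (s : Int) (e : Int) (out : Int) : Prop := out = solution_alt subway s e
instance (subway : List (List Int)) (s : Int) (e : Int) (out : Int) : Decidable (Spec_solution subway s e out) := by unfold Spec_solution; infer_instance

-- ===== CLAIM (what is proved, stated in full; the proofs are below) =====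
def Claim_equal_solution : Prop := ∀ (subway : List (List Int)) (s : Int) (e : Int), Dom_solution subway s e → Spec_solution subway s e (solution subway s e)

-- ===== LEMMAS AND PROOFS =====

-- the stops of line j (Python subway[j] for an in-range line index)
def lineAt (subway : List (List Int)) (j : Int) : List Int := (PySem.List.pyGet? subway j).getD []

-- j is a valid line index
def isLn (subway : List (List Int)) (j : Int) : Prop := 0 ≤ j ∧ j < (subway.length : Int)

-- A's check ch[j] == 1, as a Prop
def chm (ch : List Int) (j : Int) : Prop := (PySem.List.pyGet? ch j).getD 0 = 1

-- B's visited[j] read, as a Prop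
def vism (v : List Bool) (j : Int) : Prop := (PySem.List.pyGet? v j).getD false = true

-- line j passes through some stop of Q
def thrub (subway : List (List Int)) (Q : List Int) (j : Int) : Prop := ∃ x ∈ Q, x ∈ lineAt subway j

-- unmarked / unvisited line indices
def U (subway : List (List Int)) (ch : List Int) : Finset ℕ :=
  (Finset.range subway.length).filter (fun k => (PySem.List.pyGet? ch (k : Int)).getD 0 ≠ 1)
def V (subway : List (List Int)) (v : List Bool) : Finset ℕ :=
  (Finset.range subway.length).filter (fun k => (PySem.List.pyGet? v (k : Int)).getD false = false)

lemma pyGet_set_getD {α : Type} (xs : List α) (a d : α) (l j : Int)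
    (h0 : 0 ≤ l) (hj : 0 ≤ j) (hjl : j < (xs.length : Int)) :
    (PySem.List.pyGet? (xs.set l.toNat a) j).getD d =
      if j = l then a else (PySem.List.pyGet? xs j).getD d := by
  have hjt : j.toNat < xs.length := by omega
  by_cases h : j = l
  · subst h
    rw [PySem.List.pyGet?_of_nonneg _ hj]
    simp [hjt]
  · rw [PySem.List.pyGet?_of_nonneg _ hj, PySem.List.pyGet?_of_nonneg _ hj]
    have hne : l.toNat ≠ j.toNat := by omega
    simp [hne, h]

lemma graph_line_aux (i : Int) :
    ∀ (stops : List Int) (g : PySem.Dict Int (PySem.Set Int)) (P : Int → Int → Prop),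
    (∀ x j, j ∈ g.getD x PySem.Set.empty ↔ P x j) →
    ∀ x j, j ∈ (stops.foldl
        (fun g stop => g.insert stop ((g.getD stop PySem.Set.empty).add i)) g).getD x
        PySem.Set.empty ↔ P x j ∨ (x ∈ stops ∧ j = i) := by
  intro stops
  induction stops with
  | nil => intro g P hP x j; simp only [List.foldl_nil]; rw [hP x j]; simp
  | cons a t ih =>
    intro g P hP x j
    simp only [List.foldl_cons]
    have hP' : ∀ x j, j ∈ (g.insert a ((g.getD a PySem.Set.empty).add i)).getD x PySem.Set.empty
        ↔ (P x j ∨ (x = a ∧ j = i)) := by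
      intro x j
      by_cases hx : x = a
      · subst hx
        rw [PySem.Dict.getD_insert_self, PySem.Set.mem_add, hP x j]
        simp
      · rw [PySem.Dict.getD_insert_of_ne _ _ _ hx, hP x j]
        simp [hx]
    rw [ih _ _ hP' x j]
    simp only [List.mem_cons]
    tauto

lemma graph_range_aux (subway : List (List Int)) :
    ∀ (idxs : List Int) (g : PySem.Dict Int (PySem.Set Int)) (P : Int → Int → Prop),
    (∀ x j, j ∈ g.getD x PySem.Set.empty ↔ P x j) →
    ∀ x j, j ∈ (idxs.foldl
        (fun g i => ((PySem.List.pyGet? subway i).getD []).foldl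
          (fun g stop => g.insert stop ((g.getD stop PySem.Set.empty).add i)) g) g).getD x
        PySem.Set.empty ↔ P x j ∨ ∃ i ∈ idxs, x ∈ lineAt subway i ∧ j = i := by
  intro idxs
  induction idxs with
  | nil => intro g P hP x j; simp only [List.foldl_nil]; rw [hP x j]; simp
  | cons a t ih =>
    intro g P hP x j
    simp only [List.foldl_cons]
    rw [ih _ _ (graph_line_aux a ((PySem.List.pyGet? subway a).getD []) g P hP) x j]
    simp only [List.mem_cons, lineAt]
    aesop

lemma graph_mem (subway : List (List Int)) (x j : Int) :
    j ∈ (aGraph subway).getD x PySem.Set.empty ↔ isLn subway j ∧ x ∈ lineAt subway j := by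
  have hbase : ∀ x j, (j : Int) ∈ (PySem.Dict.empty : PySem.Dict Int (PySem.Set Int)).getD x
      PySem.Set.empty ↔ False := by
    intro x j
    simp [PySem.Dict.getD, PySem.Dict.empty, PySem.Dict.get?, PySem.Set.empty]
  unfold aGraph
  rw [graph_range_aux subway _ _ _ hbase x j]
  simp only [false_or, PySem.List.mem_pyRange_one]
  constructor
  · rintro ⟨i, ⟨h1, h2⟩, hx, rfl⟩; exact ⟨⟨h1, h2⟩, hx⟩
  · rintro ⟨⟨h1, h2⟩, hx⟩; exact ⟨j, ⟨h1, h2⟩, hx, rfl⟩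

lemma aScan_frozen (e L v : Int) (stops q : List Int) :
    stops.foldl
      (fun st stop =>
        match st with
        | (some v, q) => (some v, q)
        | (none, q) => if stop == e then (some L, q) else (none, q ++ [stop]))
      ((some v : Option Int), q) = (some v, q) := by
  induction stops generalizing q <;> simp_all

lemma aScan_not_mem (e L : Int) (stops q : List Int) (h : e ∉ stops) :
    aScan e L stops q = (none, q ++ stops) := by
  induction stops generalizing q with
  | nil => simp [aScan]
  | cons a t ih =>
    simp only [List.mem_cons, not_or] at h
    have ha : (a == e) = false := by simp; exact fun hh => h.1 hh.symm
    simp only [aScan, List.foldl_cons, ha, Bool.false_eq_true, if_false]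
    have := ih (q ++ [a]) h.2
    simp only [aScan] at this
    rw [this]
    simp

lemma aScan_mem (e L : Int) (stops q : List Int) (h : e ∈ stops) :
    (aScan e L stops q).1 = some L := by
  induction stops generalizing q with
  | nil => simp at h
  | cons a t ih =>
    by_cases ha : a = e
    · subst ha
      simp only [aScan, List.foldl_cons, beq_self_eq_true, if_true]
      rw [aScan_frozen]
    · rcases List.mem_cons.1 h with h1 | h2
      · exact absurd h1.symm ha
      · have hb : (a == e) = false := by simp [ha]
        simp only [aScan, List.foldl_cons, hb, Bool.false_eq_true, if_false]
        exact ih (q ++ [a]) h2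

lemma aLine_frozen (subway : List (List Int)) (e L v : Int) (ls ch q : List Int) :
    ls.foldl (aLine subway e L) (some v, ch, q) = (some v, ch, q) := by
  induction ls <;> simp_all [aLine]

lemma fold_lines (subway : List (List Int)) (e L : Int) :
    ∀ (ls ch q : List Int), (∀ l ∈ ls, isLn subway l) → ch.length = subway.length →
    ((∃ l ∈ ls, ¬ chm ch l ∧ e ∈ lineAt subway l) ∧
       (ls.foldl (aLine subway e L) (none, ch, q)).1 = some L)
    ∨ (¬ (∃ l ∈ ls, ¬ chm ch l ∧ e ∈ lineAt subway l) ∧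
       ∃ ch' q', ls.foldl (aLine subway e L) (none, ch, q) = (none, ch', q') ∧
         ch'.length = subway.length ∧
         (∀ j, isLn subway j → (chm ch' j ↔ chm ch j ∨ j ∈ ls)) ∧
         (∀ y, y ∈ q' ↔ y ∈ q ∨ ∃ l ∈ ls, ¬ chm ch l ∧ y ∈ lineAt subway l)) := by
  intro ls
  induction ls with
  | nil =>
    intro ch q hls hlen
    right
    exact ⟨by simp, ch, q, by simp, hlen, by simp, by simp⟩
  | cons a t ih =>
    intro ch q hls hlen
    have ha : isLn subway a := hls a (by simp)
    have hlsT : ∀ l ∈ t, isLn subway l := fun l hl => hls l (List.mem_cons_of_mem _ hl)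
    by_cases hm : chm ch a
    · have hb : ((PySem.List.pyGet? ch a).getD 0 == 1) = true := by simpa [chm] using hm
      have hstep : aLine subway e L (none, ch, q) a = (none, ch, q) := by
        simp [aLine, hb]
      simp only [List.foldl_cons, hstep]
      rcases ih ch q hlsT hlen with ⟨⟨l, hl, h2, h3⟩, h1⟩ | ⟨hnex, ch', q', heq, k1, k2, k3⟩
      · exact Or.inl ⟨⟨l, List.mem_cons_of_mem _ hl, h2, h3⟩, h1⟩
      · refine Or.inr ⟨?_, ch', q', heq, k1, ?_, ?_⟩
        · rintro ⟨l, hl, hnc, hel⟩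
          rcases List.mem_cons.1 hl with rfl | hl
          · exact hnc hm
          · exact hnex ⟨l, hl, hnc, hel⟩
        · intro j hj
          rw [k2 j hj]
          simp only [List.mem_cons]
          constructor
          · rintro (h | h)
            · exact Or.inl h
            · exact Or.inr (Or.inr h)
          · rintro (h | rfl | h)
            · exact Or.inl h
            · exact Or.inl hm
            · exact Or.inr h
        · intro y
          rw [k3 y]
          constructor
          · rintro (h | ⟨l, hl, hnc, hy⟩)
            · exact Or.inl h
            · exact Or.inr ⟨l, List.mem_cons_of_mem _ hl, hnc, hy⟩
          · rintro (h | ⟨l, hl, hnc, hy⟩)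
            · exact Or.inl h
            · rcases List.mem_cons.1 hl with rfl | hl
              · exact absurd hm hnc
              · exact Or.inr ⟨l, hl, hnc, hy⟩
    · have hb : ((PySem.List.pyGet? ch a).getD 0 == 1) = false := by simpa [chm] using hm
      have hlen1 : (ch.set a.toNat 1).length = subway.length := by
        rw [List.length_set]; exact hlen
      have hchm1 : ∀ j, isLn subway j → (chm (ch.set a.toNat 1) j ↔ j = a ∨ chm ch j) := by
        intro j hj
        unfold chm
        rw [pyGet_set_getD ch 1 0 a j ha.1 hj.1 (by rw [hlen]; exact hj.2)]
        by_cases hja : j = a <;> simp [hja]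
      by_cases he : e ∈ lineAt subway a
      · have h1 : (aScan e L ((PySem.List.pyGet? subway a).getD []) q).1 = some L :=
          aScan_mem e L _ q (by simpa [lineAt] using he)
        have hstep : aLine subway e L (none, ch, q) a
            = (some L, ch.set a.toNat 1, (aScan e L ((PySem.List.pyGet? subway a).getD []) q).2) := by
          simp [aLine, hb, h1]
        left
        refine ⟨⟨a, by simp, hm, he⟩, ?_⟩
        simp only [List.foldl_cons, hstep, aLine_frozen]
      · have hr : aScan e L ((PySem.List.pyGet? subway a).getD []) q
            = (none, q ++ (PySem.List.pyGet? subway a).getD []) :=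
          aScan_not_mem e L _ q (by simpa [lineAt] using he)
        have hstep : aLine subway e L (none, ch, q) a
            = (none, ch.set a.toNat 1, q ++ (PySem.List.pyGet? subway a).getD []) := by
          simp [aLine, hb, hr]
        simp only [List.foldl_cons, hstep]
        rcases ih (ch.set a.toNat 1) (q ++ (PySem.List.pyGet? subway a).getD []) hlsT hlen1 with
          ⟨⟨l, hl, hnc, hel⟩, h1⟩ | ⟨hnex, ch', q', heq, k1, k2, k3⟩
        · left
          have hncl : ¬ chm ch l := fun hc => hnc ((hchm1 l (hlsT l hl)).2 (Or.inr hc))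
          exact ⟨⟨l, List.mem_cons_of_mem _ hl, hncl, hel⟩, h1⟩
        · right
          refine ⟨?_, ch', q', heq, k1, ?_, ?_⟩
          · rintro ⟨l, hl, hnc, hel⟩
            rcases List.mem_cons.1 hl with rfl | hl
            · exact he hel
            · have hn1 : ¬ chm (ch.set a.toNat 1) l := by
                intro hc
                rcases (hchm1 l (hlsT l hl)).1 hc with rfl | hc
                · exact he hel
                · exact hnc hc
              exact hnex ⟨l, hl, hn1, hel⟩
          · intro j hj
            rw [k2 j hj, hchm1 j hj]
            simp only [List.mem_cons]
            tauto
          · intro y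
            rw [k3 y]
            simp only [List.mem_append]
            constructor
            · rintro ((h | h) | ⟨l, hl, hnc, hy⟩)
              · exact Or.inl h
              · exact Or.inr ⟨a, by simp, hm, by simpa [lineAt] using h⟩
              · have hncl : ¬ chm ch l := fun hc => hnc ((hchm1 l (hlsT l hl)).2 (Or.inr hc))
                exact Or.inr ⟨l, List.mem_cons_of_mem _ hl, hncl, hy⟩
            · rintro (h | ⟨l, hl2, hnc, hy⟩)
              · exact Or.inl (Or.inl h)
              · rcases List.mem_cons.1 hl2 with rfl | hl2
                · exact Or.inl (Or.inr (by simpa [lineAt] using hy))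
                · by_cases hc1 : chm (ch.set a.toNat 1) l
                  · rcases (hchm1 l (hlsT l hl2)).1 hc1 with rfl | hc
                    · exact Or.inl (Or.inr (by simpa [lineAt] using hy))
                    · exact absurd hc hnc
                  · exact Or.inr ⟨l, hl2, hc1, hy⟩

lemma aStop_frozen (subway : List (List Int)) (g : PySem.Dict Int (PySem.Set Int)) (e L : Int) :
    ∀ (Q : List Int) (v : Int) (ch q : List Int),
    Q.foldl (aStop subway g e L) (some v, ch, q) = (some v, ch, q) := by
  intro Q
  induction Q with
  | nil => intro v ch q; simp
  | cons x t ih =>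
    intro v ch q
    simp only [List.foldl_cons, aStop, aLine_frozen]
    exact ih v ch q

lemma thrub_cons (subway : List (List Int)) (x : Int) (Q : List Int) (j : Int) :
    thrub subway (x :: Q) j ↔ x ∈ lineAt subway j ∨ thrub subway Q j := by
  simp only [thrub, List.mem_cons]
  aesop

lemma fold_level (subway : List (List Int)) (e L : Int) :
    ∀ (Q ch q : List Int), ch.length = subway.length →
    ((∃ j, isLn subway j ∧ thrub subway Q j ∧ ¬ chm ch j ∧ e ∈ lineAt subway j) ∧
       (Q.foldl (aStop subway (aGraph subway) e L) (none, ch, q)).1 = some L)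
    ∨ (¬ (∃ j, isLn subway j ∧ thrub subway Q j ∧ ¬ chm ch j ∧ e ∈ lineAt subway j) ∧
       ∃ ch' q', Q.foldl (aStop subway (aGraph subway) e L) (none, ch, q) = (none, ch', q') ∧
         ch'.length = subway.length ∧
         (∀ j, isLn subway j → (chm ch' j ↔ chm ch j ∨ thrub subway Q j)) ∧
         (∀ y, y ∈ q' ↔ y ∈ q ∨
            ∃ j, isLn subway j ∧ thrub subway Q j ∧ ¬ chm ch j ∧ y ∈ lineAt subway j)) := by
  intro Q
  induction Q with
  | nil =>
    intro ch q hlen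
    right
    refine ⟨?_, ch, q, by simp, hlen, ?_, ?_⟩
    · rintro ⟨j, _, ⟨x, hx, _⟩, _⟩; simp at hx
    · intro j hj; simp [thrub]
    · intro y; simp [thrub]
  | cons x Q ih =>
    intro ch q hlen
    have hls : ∀ l ∈ (aGraph subway).getD x PySem.Set.empty, isLn subway l :=
      fun l hl => ((graph_mem subway x l).1 hl).1
    rcases fold_lines subway e L ((aGraph subway).getD x PySem.Set.empty) ch q hls hlen with
      ⟨⟨l, hl, hnc, hel⟩, h1⟩ | ⟨hnex, ch1, q1, heq, k1, k2, k3⟩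
    · left
      obtain ⟨hil, hxl⟩ := (graph_mem subway x l).1 hl
      have h2 : (aStop subway (aGraph subway) e L (none, ch, q) x).1 = some L := h1
      refine ⟨⟨l, hil, ⟨x, by simp, hxl⟩, hnc, hel⟩, ?_⟩
      rcases hst : aStop subway (aGraph subway) e L (none, ch, q) x with ⟨o, c2, q2⟩
      rw [hst] at h2
      simp only at h2
      subst h2
      simp only [List.foldl_cons, hst, aStop_frozen]
    · have hst : aStop subway (aGraph subway) e L (none, ch, q) x = (none, ch1, q1) := heq
      have k2' : ∀ j, isLn subway j → (chm ch1 j ↔ chm ch j ∨ x ∈ lineAt subway j) := by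
        intro j hj
        rw [k2 j hj]
        constructor
        · rintro (h | h)
          · exact Or.inl h
          · exact Or.inr ((graph_mem subway x j).1 h).2
        · rintro (h | h)
          · exact Or.inl h
          · exact Or.inr ((graph_mem subway x j).2 ⟨hj, h⟩)
      have k3' : ∀ y, y ∈ q1 ↔ y ∈ q ∨
          ∃ l, isLn subway l ∧ x ∈ lineAt subway l ∧ ¬ chm ch l ∧ y ∈ lineAt subway l := by
        intro y
        rw [k3 y]
        constructor
        · rintro (h | ⟨l, hl, hnc, hy⟩)
          · exact Or.inl h
          · obtain ⟨hil, hxl⟩ := (graph_mem subway x l).1 hl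
            exact Or.inr ⟨l, hil, hxl, hnc, hy⟩
        · rintro (h | ⟨l, hil, hxl, hnc, hy⟩)
          · exact Or.inl h
          · exact Or.inr ⟨l, (graph_mem subway x l).2 ⟨hil, hxl⟩, hnc, hy⟩
      have hnex' : ¬ ∃ l, isLn subway l ∧ x ∈ lineAt subway l ∧ ¬ chm ch l ∧ e ∈ lineAt subway l := by
        rintro ⟨l, hil, hxl, hnc, hel⟩
        exact hnex ⟨l, (graph_mem subway x l).2 ⟨hil, hxl⟩, hnc, hel⟩
      rcases ih ch1 q1 k1 with ⟨⟨j, hj1, hj2, hj3, hj4⟩, h1⟩ | ⟨hnex2, ch', q', heq2, m1, m2, m3⟩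
      · left
        have hncj : ¬ chm ch j := fun hc => hj3 ((k2' j hj1).2 (Or.inl hc))
        refine ⟨⟨j, hj1, (thrub_cons subway x Q j).2 (Or.inr hj2), hncj, hj4⟩, ?_⟩
        simp only [List.foldl_cons, hst]
        exact h1
      · right
        refine ⟨?_, ch', q', ?_, m1, ?_, ?_⟩
        · rintro ⟨j, hj1, hthr, hnc, hel⟩
          rcases (thrub_cons subway x Q j).1 hthr with hx | hthrQ
          · exact hnex' ⟨j, hj1, hx, hnc, hel⟩
          · by_cases hc1 : chm ch1 j
            · rcases (k2' j hj1).1 hc1 with hc | hx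
              · exact hnc hc
              · exact hnex' ⟨j, hj1, hx, hnc, hel⟩
            · exact hnex2 ⟨j, hj1, hthrQ, hc1, hel⟩
        · simp only [List.foldl_cons, hst]
          exact heq2
        · intro j hj
          rw [m2 j hj, k2' j hj, thrub_cons subway x Q j]
          tauto
        · intro y
          rw [m3 y]
          constructor
          · rintro (h | ⟨j, hj1, hthrQ, hnc, hy⟩)
            · rcases (k3' y).1 h with h | ⟨l, hil, hxl, hnc, hy⟩
              · exact Or.inl h
              · exact Or.inr ⟨l, hil, (thrub_cons subway x Q l).2 (Or.inl hxl), hnc, hy⟩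
            · have hncj : ¬ chm ch j := fun hc => hnc ((k2' j hj1).2 (Or.inl hc))
              exact Or.inr ⟨j, hj1, (thrub_cons subway x Q j).2 (Or.inr hthrQ), hncj, hy⟩
          · rintro (h | ⟨j, hj1, hthr, hnc, hy⟩)
            · exact Or.inl ((k3' y).2 (Or.inl h))
            · rcases (thrub_cons subway x Q j).1 hthr with hx | hthrQ
              · exact Or.inl ((k3' y).2 (Or.inr ⟨j, hj1, hx, hnc, hy⟩))
              · by_cases hc1 : chm ch1 j
                · rcases (k2' j hj1).1 hc1 with hc | hx
                  · exact absurd hc hnc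
                  · exact Or.inl ((k3' y).2 (Or.inr ⟨j, hj1, hx, hnc, hy⟩))
                · exact Or.inr ⟨j, hj1, hthrQ, hc1, hy⟩

lemma aLoop_nil (subway : List (List Int)) (g : PySem.Dict Int (PySem.Set Int)) (e : Int)
    (fa : Nat) (ch : List Int) (L : Int) : aLoop subway g e fa [] ch L = -1 := by
  cases fa <;> simp [aLoop]

lemma bLoop_nil (subway : List (List Int)) (e : Int) (fb : Nat) (v : List Bool) (L : Int) :
    bLoop subway e fb v [] L = -1 := by
  cases fb <;> simp [bLoop]

lemma aLoop_noNew (subway : List (List Int)) (e : Int) (fa : Nat) (Q ch : List Int) (L : Int)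
    (hlen : ch.length = subway.length)
    (h : ∀ j, isLn subway j → thrub subway Q j → chm ch j) :
    aLoop subway (aGraph subway) e fa Q ch L = -1 := by
  induction fa generalizing Q ch L with
  | zero => rfl
  | succ fa ih =>
    rcases Q with _ | ⟨x, Qt⟩
    · simp [aLoop]
    · simp only [aLoop, List.isEmpty_cons, Bool.false_eq_true, if_false]
      rcases fold_level subway e L (x :: Qt) ch [] hlen with ⟨⟨j, hj1, hj2, hj3, _⟩, _⟩ |
        ⟨_, ch', q', heq, m1, _, m3⟩
      · exact absurd (h j hj1 hj2) hj3
      · have hst : aLevel subway (aGraph subway) e L (x :: Qt) ch = (none, ch', q') := heq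
        rw [hst]
        have hq' : q' = [] := by
          rw [List.eq_nil_iff_forall_not_mem]
          intro y hy
          rcases (m3 y).1 hy with hy0 | ⟨j, hj1, hj2, hj3, _⟩
          · simp at hy0
          · exact hj3 (h j hj1 hj2)
        subst hq'
        exact aLoop_nil subway (aGraph subway) e fa ch' (L + 1)

lemma bStops_mem (subway : List (List Int)) (F : List Int) (y : Int) :
    y ∈ bStops subway F ↔ ∃ i ∈ F, y ∈ lineAt subway i := by
  have aux : ∀ (G : List Int) (st : PySem.Set Int),
      y ∈ G.foldl
        (fun st i => ((PySem.List.pyGet? subway i).getD []).foldl (fun st stop => st.add stop) st)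
        st ↔ y ∈ st ∨ ∃ i ∈ G, y ∈ lineAt subway i := by
    intro G
    induction G with
    | nil => simp
    | cons a t ih =>
      intro st
      simp only [List.foldl_cons]
      rw [ih]
      have : ((PySem.List.pyGet? subway a).getD []).foldl (fun st stop => st.add stop) st
          = PySem.Set.update st ((PySem.List.pyGet? subway a).getD []) := rfl
      rw [this, ]
      simp only [PySem.Set.mem_update, List.mem_cons, lineAt]
      aesop
  unfold bStops
  rw [aux]
  simp

lemma mark_fold (nxt : List Int) (v : List Bool) (hok : ∀ j ∈ nxt, 0 ≤ j) :
    (nxt.foldl (fun v j => v.set j.toNat true) v).length = v.length ∧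
    ∀ j : Int, 0 ≤ j → j < (v.length : Int) →
      (vism (nxt.foldl (fun v j => v.set j.toNat true) v) j ↔ vism v j ∨ j ∈ nxt) := by
  induction nxt generalizing v with
  | nil => simp
  | cons a t ih =>
    simp only [List.mem_cons, forall_eq_or_imp] at hok
    obtain ⟨hlen, hmem⟩ := ih (v.set a.toNat true) hok.2
    simp only [List.foldl_cons]
    constructor
    · rw [hlen, List.length_set]
    · intro j hj0 hjl
      rw [hmem j hj0 (by rwa [List.length_set])]
      unfold vism
      rw [pyGet_set_getD v true false a j hok.1 hj0 hjl]
      by_cases hja : j = a <;> simp [hja]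

lemma chm_replicate (n : Nat) (j : Int) : ¬ chm (List.replicate n 0) j := by
  unfold chm
  intro hc
  rcases h : PySem.List.pyGet? (List.replicate n (0 : Int)) j with _ | x
  · rw [h] at hc; simp at hc
  · have hx := PySem.List.mem_of_pyGet?_eq_some _ h
    have := List.eq_of_mem_replicate hx
    rw [h] at hc; simp at hc; omega

lemma nxt_mem (subway : List (List Int)) (visited : List Bool) (F : List Int) (j : Int) :
    (j ∈ (PySem.List.pyRange 0 (subway.length : Int) 1).filter
        (fun j => !((PySem.List.pyGet? visited j).getD false) &&
                  ((PySem.List.pyGet? subway j).getD []).any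
                    (fun stop => (bStops subway F).contains stop))) ↔
      (isLn subway j ∧ ¬ vism visited j ∧
        ∃ y ∈ lineAt subway j, ∃ i ∈ F, y ∈ lineAt subway i) := by
  rw [List.mem_filter]
  simp only [Bool.and_eq_true, Bool.not_eq_eq_eq_not, Bool.not_true, List.any_eq_true,
    PySem.Set.contains_iff, PySem.List.mem_pyRange_one]
  constructor
  · rintro ⟨⟨h0, h1⟩, hv, y, hy, hb⟩
    exact ⟨⟨h0, h1⟩, by simp [vism, hv], y, by simpa [lineAt] using hy,
      (bStops_mem subway F y).1 hb⟩
  · rintro ⟨⟨h0, h1⟩, hv, y, hy, hb⟩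
    refine ⟨⟨h0, h1⟩, ?_, y, by simpa [lineAt] using hy, (bStops_mem subway F y).2 hb⟩
    simp only [vism] at hv
    exact Bool.not_eq_true _ ▸ hv

lemma main_loop (subway : List (List Int)) (e : Int) :
    ∀ (fa fb : Nat) (Q ch : List Int) (visited : List Bool) (F : List Int) (L : Int),
    ch.length = subway.length → visited.length = subway.length →
    (∀ j, isLn subway j → (vism visited j ↔ (chm ch j ∨ j ∈ F))) →
    (∀ j : Int, j ∈ F ↔ (thrub subway Q j ∧ isLn subway j ∧ ¬ chm ch j)) →
    (U subway ch).card + 2 ≤ fa → (V subway visited).card + 1 ≤ fb →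
    aLoop subway (aGraph subway) e fa Q ch L = bLoop subway e fb visited F L := by
  intro fa
  induction fa with
  | zero => intro fb Q ch visited F L _ _ _ _ hfa _; omega
  | succ fa ih =>
    intro fb Q ch visited F L hlen hvlen hrel hF hfa hfb
    rcases fb with _ | fb
    · omega
    rcases Q with _ | ⟨x, Qt⟩
    · have hFnil : F = [] := by
        rw [List.eq_nil_iff_forall_not_mem]
        intro j hj
        rcases (hF j).1 hj with ⟨⟨y, hy, _⟩, _⟩
        simp at hy
      subst hFnil
      rw [aLoop_nil, bLoop_nil]
    rcases hFc : F with _ | ⟨f, Ft⟩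
    · rw [bLoop_nil]
      refine aLoop_noNew subway e (fa+1) (x::Qt) ch L hlen ?_
      intro j hj1 hj2
      by_contra hnc
      have hjF : j ∈ F := (hF j).2 ⟨hj2, hj1, hnc⟩
      rw [hFc] at hjF
      simp at hjF
    · subst hFc
      simp only [aLoop, List.isEmpty_cons, Bool.false_eq_true, if_false]
      simp only [bLoop, List.isEmpty_cons, Bool.false_eq_true, if_false]
      have hexiF : (∃ j, isLn subway j ∧ thrub subway (x::Qt) j ∧ ¬ chm ch j ∧ e ∈ lineAt subway j)
          ↔ (∃ i ∈ f :: Ft, e ∈ lineAt subway i) := by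
        constructor
        · rintro ⟨j, h1, h2, h3, h4⟩; exact ⟨j, (hF j).2 ⟨h2, h1, h3⟩, h4⟩
        · rintro ⟨i, hi, he⟩
          rcases (hF i).1 hi with ⟨h2, h1, h3⟩
          exact ⟨i, h1, h2, h3, he⟩
      by_cases hex : ∃ i ∈ f :: Ft, e ∈ lineAt subway i
      · have hany : ((f::Ft).any (fun i => decide (e ∈ (PySem.List.pyGet? subway i).getD []))) = true := by
          simp only [List.any_eq_true, decide_eq_true_eq]
          simpa [lineAt] using hex
        rw [hany]
        simp only [if_true]
        rcases fold_level subway e L (x::Qt) ch [] hlen with ⟨_, h1⟩ | ⟨hnex, _, _, _, _, _, _⟩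
        · have h2 : (aLevel subway (aGraph subway) e L (x::Qt) ch).1 = some L := h1
          rcases hst : aLevel subway (aGraph subway) e L (x::Qt) ch with ⟨o, c2, q2⟩
          rw [hst] at h2
          simp only at h2
          subst h2
          rfl
        · exact absurd (hexiF.2 hex) hnex
      · have hany : ((f::Ft).any (fun i => decide (e ∈ (PySem.List.pyGet? subway i).getD []))) = false := by
          rw [← Bool.not_eq_true, List.any_eq_true]
          simp only [decide_eq_true_eq]
          simpa [lineAt] using hex
        rw [hany]
        simp only [Bool.false_eq_true, if_false]
        rcases fold_level subway e L (x::Qt) ch [] hlen with ⟨hexi, _⟩ |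
          ⟨hnex, ch', q', heq, m1, m2, m3⟩
        · exact absurd (hexiF.1 hexi) hex
        have hst : aLevel subway (aGraph subway) e L (x::Qt) ch = (none, ch', q') := heq
        rw [hst]
        set nxt := (PySem.List.pyRange 0 (subway.length : Int) 1).filter
          (fun j => !((PySem.List.pyGet? visited j).getD false) &&
            ((PySem.List.pyGet? subway j).getD []).any
              (fun stop => (bStops subway (f::Ft)).contains stop)) with hnxtdef
        set visited' := nxt.foldl (fun v j => v.set j.toNat true) visited with hvdef
        have hnxt : ∀ j, j ∈ nxt ↔ isLn subway j ∧ ¬ vism visited j ∧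
            ∃ y ∈ lineAt subway j, ∃ i ∈ f::Ft, y ∈ lineAt subway i := by
          intro j
          rw [hnxtdef]
          exact nxt_mem subway visited (f::Ft) j
        have hq'mem : ∀ y, y ∈ q' ↔ ∃ i ∈ f::Ft, y ∈ lineAt subway i := by
          intro y
          rw [m3 y]
          constructor
          · rintro (h | ⟨j, hj1, hj2, hj3, hy⟩)
            · simp at h
            · exact ⟨j, (hF j).2 ⟨hj2, hj1, hj3⟩, hy⟩
          · rintro ⟨i, hi, hy⟩
            rcases (hF i).1 hi with ⟨h2, h1, h3⟩
            exact Or.inr ⟨i, h1, h2, h3, hy⟩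
        have hF' : ∀ j, j ∈ nxt ↔ (thrub subway q' j ∧ isLn subway j ∧ ¬ chm ch' j) := by
          intro j
          rw [hnxt j]
          constructor
          · rintro ⟨hj1, hnv, y, hy, hyF⟩
            have hnv' : ¬ (chm ch j ∨ j ∈ f::Ft) := fun h => hnv ((hrel j hj1).2 h)
            rw [not_or] at hnv'
            have hnchm' : ¬ chm ch' j := by
              rw [m2 j hj1]
              rintro (h | h)
              · exact hnv'.1 h
              · exact hnv'.2 ((hF j).2 ⟨h, hj1, hnv'.1⟩)
            exact ⟨⟨y, (hq'mem y).2 hyF, hy⟩, hj1, hnchm'⟩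
          · rintro ⟨⟨y, hyq, hy⟩, hj1, hnchm'⟩
            have h1 : ¬ chm ch j := fun h => hnchm' ((m2 j hj1).2 (Or.inl h))
            have h2 : ¬ thrub subway (x::Qt) j := fun h => hnchm' ((m2 j hj1).2 (Or.inr h))
            have hnv : ¬ vism visited j := by
              rw [hrel j hj1]
              rintro (h | h)
              · exact h1 h
              · exact h2 ((hF j).1 h).1
            exact ⟨hj1, hnv, y, hy, (hq'mem y).1 hyq⟩
        have hok : ∀ j ∈ nxt, 0 ≤ j := fun j hj => ((hnxt j).1 hj).1.1
        obtain ⟨hmlen, hmm⟩ := mark_fold nxt visited hok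
        have hvlen' : visited'.length = subway.length := by
          rw [hvdef, hmlen, hvlen]
        have hrel' : ∀ j, isLn subway j → (vism visited' j ↔ (chm ch' j ∨ j ∈ nxt)) := by
          intro j hj
          rw [hvdef, hmm j hj.1 (by rw [hvlen]; exact hj.2)]
          constructor
          · rintro (h | h)
            · rcases (hrel j hj).1 h with hc | hFj
              · exact Or.inl ((m2 j hj).2 (Or.inl hc))
              · exact Or.inl ((m2 j hj).2 (Or.inr ((hF j).1 hFj).1))
            · exact Or.inr h
          · rintro (h | h)
            · rcases (m2 j hj).1 h with hc | hth
              · exact Or.inl ((hrel j hj).2 (Or.inl hc))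
              · by_cases hcc : chm ch j
                · exact Or.inl ((hrel j hj).2 (Or.inl hcc))
                · exact Or.inl ((hrel j hj).2 (Or.inr ((hF j).2 ⟨hth, hj, hcc⟩)))
            · exact Or.inr h
        have hUsub : U subway ch' ⊆ U subway ch := by
          intro k hk
          simp only [U, Finset.mem_filter, Finset.mem_range] at hk ⊢
          refine ⟨hk.1, fun hc => hk.2 ?_⟩
          have hjl : isLn subway (k:Int) := ⟨Int.natCast_nonneg k, by exact_mod_cast hk.1⟩
          exact (m2 _ hjl).2 (Or.inl hc)
        have hfF := (hF f).1 (by simp)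
        obtain ⟨hthrf, hfl, hncf⟩ := hfF
        obtain ⟨hfl1, hfl2⟩ := hfl
        have hfl : isLn subway f := ⟨hfl1, hfl2⟩
        have hcastf : ((f.toNat : Nat) : Int) = f := Int.toNat_of_nonneg hfl1
        have hUlt : (U subway ch').card < (U subway ch).card := by
          refine Finset.card_lt_card ((Finset.ssubset_iff_of_subset hUsub).2 ⟨f.toNat, ?_, ?_⟩)
          · simp only [U, Finset.mem_filter, Finset.mem_range]
            refine ⟨by omega, ?_⟩
            rw [hcastf]
            exact hncf
          · intro hmem
            simp only [U, Finset.mem_filter, Finset.mem_range, hcastf] at hmem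
            exact hmem.2 ((m2 f hfl).2 (Or.inr hthrf))
        by_cases hne : nxt = []
        · rw [hne, bLoop_nil]
          refine aLoop_noNew subway e fa q' ch' (L+1) m1 ?_
          intro j hj1 hj2
          by_contra hncc
          have hjn : j ∈ nxt := (hF' j).2 ⟨hj2, hj1, hncc⟩
          rw [hne] at hjn
          simp at hjn
        · obtain ⟨n0, nt, hncons⟩ := List.exists_cons_of_ne_nil hne
          have hn0 : n0 ∈ nxt := by rw [hncons]; simp
          obtain ⟨hn0l, hn0v, _⟩ := (hnxt n0).1 hn0
          have hVsub : V subway visited' ⊆ V subway visited := by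
            intro k hk
            simp only [V, Finset.mem_filter, Finset.mem_range] at hk ⊢
            refine ⟨hk.1, ?_⟩
            have hjl : isLn subway (k:Int) := ⟨Int.natCast_nonneg k, by exact_mod_cast hk.1⟩
            by_contra hvv
            have hvt : vism visited (k:Int) := by
              simp only [vism]
              exact Bool.not_eq_false _ ▸ hvv
            have : vism visited' (k:Int) := by
              rw [hvdef, hmm (k:Int) hjl.1 (by rw [hvlen]; exact hjl.2)]
              exact Or.inl hvt
            simp only [vism] at this
            rw [hk.2] at this
            simp at this
          obtain ⟨hn0l1, hn0l2⟩ := hn0l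
          have hn0l : isLn subway n0 := ⟨hn0l1, hn0l2⟩
          have hcastn : ((n0.toNat : Nat) : Int) = n0 := Int.toNat_of_nonneg hn0l1
          have hVlt : (V subway visited').card < (V subway visited).card := by
            refine Finset.card_lt_card ((Finset.ssubset_iff_of_subset hVsub).2 ⟨n0.toNat, ?_, ?_⟩)
            · simp only [V, Finset.mem_filter, Finset.mem_range, hcastn]
              refine ⟨by omega, ?_⟩
              simp only [vism] at hn0v
              exact Bool.not_eq_true _ ▸ hn0v
            · intro hmem
              simp only [V, Finset.mem_filter, Finset.mem_range, hcastn] at hmem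
              have hvt : vism visited' n0 := by
                rw [hvdef, hmm n0 hn0l.1 (by rw [hvlen]; exact hn0l.2)]
                exact Or.inr hn0
              simp only [vism] at hvt
              rw [hmem.2] at hvt
              simp at hvt
          exact ih fb q' ch' visited' nxt (L+1) m1 hvlen' hrel' hF' (by omega) (by omega)

-- ===== VERDICT (by name: the statement is the Claim_ definition above) =====
theorem solution_spec : Claim_equal_solution := by
  intro subway s e _dom
  unfold Spec_solution solution solution_alt
  refine main_loop subway e (subway.length + 2) (subway.length + 1) [s]
    (List.replicate subway.length 0) (subway.map (fun line => decide (s ∈ line)))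
    ((PySem.List.pyRange 0 (subway.length : Int) 1).filter
      (fun i => decide (s ∈ (PySem.List.pyGet? subway i).getD []))) 0
    (by simp) (by simp) ?_ ?_ ?_ ?_
  · intro j hj
    obtain ⟨hj1, hj2⟩ := hj
    have hj : isLn subway j := ⟨hj1, hj2⟩
    have hjn : j.toNat < subway.length := by omega
    constructor
    · intro hv
      right
      rw [List.mem_filter]
      refine ⟨by rw [PySem.List.mem_pyRange_one]; exact ⟨hj.1, hj.2⟩, ?_⟩
      simp only [decide_eq_true_eq]
      unfold vism at hv
      rw [PySem.List.pyGet?_of_nonneg _ hj.1, List.getElem?_map,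
        List.getElem?_eq_getElem hjn] at hv
      simp only [Option.map_some, Option.getD_some, decide_eq_true_eq] at hv
      rw [PySem.List.pyGet?_of_nonneg _ hj.1, List.getElem?_eq_getElem hjn]
      simpa using hv
    · intro h
      rcases h with hc | hmem
      · exact absurd hc (chm_replicate _ j)
      · rw [List.mem_filter] at hmem
        have hs := hmem.2
        simp only [decide_eq_true_eq] at hs
        unfold vism
        rw [PySem.List.pyGet?_of_nonneg _ hj.1, List.getElem?_map,
          List.getElem?_eq_getElem hjn]
        rw [PySem.List.pyGet?_of_nonneg _ hj.1, List.getElem?_eq_getElem hjn] at hs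
        simpa using hs
  · intro j
    rw [List.mem_filter]
    simp only [PySem.List.mem_pyRange_one, decide_eq_true_eq]
    constructor
    · rintro ⟨⟨h0, h1⟩, hs⟩
      exact ⟨⟨s, by simp, by simpa [lineAt] using hs⟩, ⟨h0, h1⟩, chm_replicate _ j⟩
    · rintro ⟨⟨y, hy, hline⟩, hj, _⟩
      simp only [List.mem_singleton] at hy
      subst hy
      exact ⟨⟨hj.1, hj.2⟩, by simpa [lineAt] using hline⟩
  · have h := Finset.card_filter_le (Finset.range subway.length)
      (fun k => (PySem.List.pyGet? (List.replicate subway.length (0:Int)) (k:Int)).getD 0 ≠ 1)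
    simp only [Finset.card_range] at h
    simp only [U]
    omega
  · have h := Finset.card_filter_le (Finset.range subway.length)
      (fun k => (PySem.List.pyGet? (subway.map (fun line => decide (s ∈ line))) (k:Int)).getD false = false)
    simp only [Finset.card_range] at h
    simp only [V]
    omega
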